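-- pv_equiv track=rewrite | github.com/maksss73/aisdlab | lab3.py | prod_perimeter_area2
-- ===== SOURCE A (Python) =====
-- def prod_perimeter_area2(a):
--     n = len(a)
--     prod = 1
--     found = False
--     for i in range(n):
--         for j in range(n):
--             if i > j and i + j > n - 1:
--                 # Проверка, что элемент на периметре области 2
--                 if (i == n - 1) or (j == 0) or (i == j + 1) or (i + j == n):
--                     prod *= a[i][j]
--                     found = True
--     return prod if found else 0
-- ===== SOURCE B (Python) =====
-- def prod_perimeter_area2(a):
--     # O(n): walk only the O(n) perimeter cells of region 2 directly, in row order.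
--     n = len(a)
--     if n < 3:
--         return 0
--     prod = 1
--     for i in range(n // 2 + 1, n - 1):
--         if n - i == i - 1:
--             prod *= a[i][i - 1]
--         else:
--             prod *= a[i][n - i] * a[i][i - 1]
--     for j in range(1, n - 1):
--         prod *= a[n - 1][j]
--     return prod
-- ===== Notes on version B (the rewrite author's own statement) =====
-- stated objective: faster
-- what changed: B skips the O(n^2) full-grid scan and multiplies only the O(n) perimeter cells of region 2 directly: the two diagonal edges (one or two cells per row i in range(n//2+1, n-1)) and the bottom row segment.
import Mathlib
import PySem

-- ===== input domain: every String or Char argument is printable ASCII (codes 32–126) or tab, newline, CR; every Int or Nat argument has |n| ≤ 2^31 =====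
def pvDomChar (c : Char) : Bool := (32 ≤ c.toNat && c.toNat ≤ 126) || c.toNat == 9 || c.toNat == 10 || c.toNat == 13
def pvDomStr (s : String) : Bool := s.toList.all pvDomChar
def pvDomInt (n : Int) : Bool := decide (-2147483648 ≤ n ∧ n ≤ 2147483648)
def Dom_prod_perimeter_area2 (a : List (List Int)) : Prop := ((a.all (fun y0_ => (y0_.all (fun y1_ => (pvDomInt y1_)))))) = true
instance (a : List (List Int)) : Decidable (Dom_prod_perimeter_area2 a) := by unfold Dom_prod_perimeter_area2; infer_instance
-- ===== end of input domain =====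

-- B replaces A's O(n^2) full-grid scan with a direct O(n) walk over the perimeter cells of region 2, in the same row-major order.


-- ===== PORT A =====
-- literal transliteration of A: nested loops over the whole n×n grid; a[i][j] is
-- in range whenever Pre_ holds, so getD's default is never used inside Pre_.
def prod_perimeter_area2 (a : List (List Int)) : Int :=
  let n := a.length
  let r := (List.range n).foldl (fun (s : Int × Bool) i =>
    (List.range n).foldl (fun (s : Int × Bool) j =>
      if j < i ∧ n - 1 < i + j then
        if i = n - 1 ∨ j = 0 ∨ i = j + 1 ∨ i + j = n then
          (s.1 * (a.getD i []).getD j 0, true)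
        else s
      else s) s) ((1 : Int), false)
  if r.2 then r.1 else 0

-- ===== PORT B =====
-- literal transliteration of B: only the O(n) perimeter cells, row by row.
def prod_perimeter_area2_alt (a : List (List Int)) : Int :=
  let n := a.length
  if n < 3 then 0
  else
    let p := (List.range' (n / 2 + 1) (n - 2 - n / 2)).foldl (fun (p : Int) i =>
      if n - i = i - 1 then p * (a.getD i []).getD (i - 1) 0
      else p * ((a.getD i []).getD (n - i) 0 * (a.getD i []).getD (i - 1) 0)) 1
    (List.range' 1 (n - 2)).foldl (fun (p : Int) j => p * (a.getD (n - 1) []).getD j 0) p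

-- ===== PRECONDITION & SPEC =====
-- Pre_ excludes exactly the inputs on which Python A raises IndexError: a row i of the
-- scanned region shorter than the largest column index A reads in it.
def Pre_prod_perimeter_area2 (a : List (List Int)) : Prop :=
  ∀ i, i < a.length → a.length < 2 * i →
    max (i - 1) (a.length - i) + 1 ≤ (a.getD i []).length
instance (a : List (List Int)) : Decidable (Pre_prod_perimeter_area2 a) := by
  unfold Pre_prod_perimeter_area2; infer_instance
def pvWitness_prod_perimeter_area2 : List (List Int) := [[1, 2, 3], [4, 5, 6], [7, 8, 9]]

def Spec_prod_perimeter_area2 (a : List (List Int)) (out : Int) : Prop := out = prod_perimeter_area2_alt a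
instance (a : List (List Int)) (out : Int) : Decidable (Spec_prod_perimeter_area2 a out) := by unfold Spec_prod_perimeter_area2; infer_instance

-- ===== CLAIM (what is proved, stated in full; the proofs are below) =====
def Claim_equal_prod_perimeter_area2 : Prop := ∀ (a : List (List Int)), Dom_prod_perimeter_area2 a → Pre_prod_perimeter_area2 a → Spec_prod_perimeter_area2 a (prod_perimeter_area2 a)

-- ===== LEMMAS AND PROOFS =====

-- the cell value A and B both read
def pvV (a : List (List Int)) (i j : Nat) : Int := (a.getD i []).getD j 0

-- the columns A multiplies in row i
def pvCells (n i : Nat) : List Nat :=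
  (List.range n).filter (fun j =>
    decide ((j < i ∧ n - 1 < i + j) ∧ (i = n - 1 ∨ j = 0 ∨ i = j + 1 ∨ i + j = n)))

def pvQ (a : List (List Int)) (i : Nat) : Int := ((pvCells a.length i).map (pvV a i)).prod
def pvB (n i : Nat) : Bool := !(pvCells n i).isEmpty

lemma pw_ext : ∀ (l1 l2 : List Nat), l1.Pairwise (· < ·) → l2.Pairwise (· < ·) →
    (∀ x, x ∈ l1 ↔ x ∈ l2) → l1 = l2 := by
  intro l1
  induction l1 with
  | nil =>
    intro l2 _ _ h
    cases l2 with
    | nil => rfl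
    | cons b t => exact absurd ((h b).2 (List.mem_cons_self)) (by simp)
  | cons a t ih =>
    intro l2 h1 h2 h
    cases l2 with
    | nil => exact absurd ((h a).1 (List.mem_cons_self)) (by simp)
    | cons b t2 =>
      have hab : a = b := by
        rcases List.mem_cons.1 ((h a).1 List.mem_cons_self) with h' | h'
        · exact h'
        · rcases List.mem_cons.1 ((h b).2 List.mem_cons_self) with h'' | h''
          · exact h''.symm
          · exact absurd (Nat.lt_trans ((List.pairwise_cons.1 h1).1 b h'')
              ((List.pairwise_cons.1 h2).1 a h')) (Nat.lt_irrefl a)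
      subst hab
      have ht : ∀ x, x ∈ t ↔ x ∈ t2 := by
        intro x
        constructor
        · intro hx
          rcases List.mem_cons.1 ((h x).1 (List.mem_cons_of_mem _ hx)) with h' | h'
          · exact absurd ((List.pairwise_cons.1 h1).1 x hx) (by omega)
          · exact h'
        · intro hx
          rcases List.mem_cons.1 ((h x).2 (List.mem_cons_of_mem _ hx)) with h' | h'
          · exact absurd ((List.pairwise_cons.1 h2).1 x hx) (by omega)
          · exact h'
      rw [ih t2 (List.pairwise_cons.1 h1).2 (List.pairwise_cons.1 h2).2 ht]

lemma mem_pvCells {n i x : Nat} : x ∈ pvCells n i ↔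
    x < n ∧ (x < i ∧ n - 1 < i + x) ∧ (i = n - 1 ∨ x = 0 ∨ i = x + 1 ∨ i + x = n) := by
  simp [pvCells, List.mem_filter, List.mem_range, and_comm]

lemma pvCells_pw (n i : Nat) : (pvCells n i).Pairwise (· < ·) :=
  List.Pairwise.filter _ List.pairwise_lt_range

lemma cells_low {n i : Nat} (h : 2 * i ≤ n) : pvCells n i = [] := by
  rw [List.eq_nil_iff_forall_not_mem]
  intro x hx
  rw [mem_pvCells] at hx
  omega

lemma cells_bot {n : Nat} (h : 2 < n) : pvCells n (n - 1) = List.range' 1 (n - 2) := by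
  apply pw_ext _ _ (pvCells_pw _ _) (List.pairwise_lt_range' 1)
  intro x
  rw [mem_pvCells, List.mem_range'_1]
  omega

lemma cells_mid {n i : Nat} (h1 : n < 2 * i) (h2 : i < n - 1) :
    pvCells n i = if n - i = i - 1 then [i - 1] else [n - i, i - 1] := by
  split_ifs with hc
  · apply pw_ext _ _ (pvCells_pw _ _) (by simp)
    intro x
    rw [mem_pvCells]
    simp only [List.mem_singleton]
    omega
  · apply pw_ext _ _ (pvCells_pw _ _) (by simp; omega)
    intro x
    rw [mem_pvCells]
    simp only [List.mem_cons, List.not_mem_nil, or_false]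
    omega

lemma foldl_cells (a : List (List Int)) (i : Nat) :
    ∀ (cs : List Nat) (s : Int × Bool),
      cs.foldl (fun s j => (s.1 * pvV a i j, true)) s =
        (s.1 * (cs.map (pvV a i)).prod, s.2 || !cs.isEmpty) := by
  intro cs
  induction cs with
  | nil => intro s; simp
  | cons c t ih =>
    intro s
    simp [List.foldl_cons, ih, mul_assoc]

lemma inner_eq (a : List (List Int)) (i : Nat) (s : Int × Bool) :
    (List.range a.length).foldl (fun (s : Int × Bool) j =>
      if j < i ∧ a.length - 1 < i + j then
        if i = a.length - 1 ∨ j = 0 ∨ i = j + 1 ∨ i + j = a.length then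
          (s.1 * (a.getD i []).getD j 0, true)
        else s
      else s) s = (s.1 * pvQ a i, s.2 || pvB a.length i) := by
  have hfun : (fun (s : Int × Bool) j =>
      if j < i ∧ a.length - 1 < i + j then
        if i = a.length - 1 ∨ j = 0 ∨ i = j + 1 ∨ i + j = a.length then
          (s.1 * (a.getD i []).getD j 0, true)
        else s
      else s) = (fun (s : Int × Bool) (j : Nat) =>
      if (j < i ∧ a.length - 1 < i + j) ∧
          (i = a.length - 1 ∨ j = 0 ∨ i = j + 1 ∨ i + j = a.length) then
        (s.1 * pvV a i j, true)
      else s) := by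
    funext s j
    by_cases h1 : j < i ∧ a.length - 1 < i + j <;>
      by_cases h2 : i = a.length - 1 ∨ j = 0 ∨ i = j + 1 ∨ i + j = a.length <;>
      simp [pvV, h1, h2]
  rw [hfun, PySem.List.foldl_ite_eq_foldl_filter]
  rw [show (List.filter _ (List.range a.length)) = pvCells a.length i from rfl]
  exact foldl_cells a i _ s

lemma outer_eq (a : List (List Int)) :
    ∀ (l : List Nat) (s : Int × Bool),
      l.foldl (fun s i => (s.1 * pvQ a i, s.2 || pvB a.length i)) s =
        (s.1 * (l.map (pvQ a)).prod, s.2 || l.any (pvB a.length)) := by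
  intro l
  induction l with
  | nil => intro s; simp
  | cons c t ih =>
    intro s
    simp [List.foldl_cons, ih, mul_assoc, Bool.or_assoc]

lemma A_eq (a : List (List Int)) :
    prod_perimeter_area2 a =
      if (List.range a.length).any (pvB a.length) then
        ((List.range a.length).map (pvQ a)).prod else 0 := by
  unfold prod_perimeter_area2
  have hfun : (fun (s : Int × Bool) i =>
      (List.range a.length).foldl (fun (s : Int × Bool) j =>
        if j < i ∧ a.length - 1 < i + j then
          if i = a.length - 1 ∨ j = 0 ∨ i = j + 1 ∨ i + j = a.length then
            (s.1 * (a.getD i []).getD j 0, true)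
          else s
        else s) s) =
      (fun (s : Int × Bool) i => (s.1 * pvQ a i, s.2 || pvB a.length i)) := by
    funext s i
    exact inner_eq a i s
  simp only [hfun, outer_eq a (List.range a.length) (1, false)]
  simp

lemma foldl_mul (f : Nat → Int) :
    ∀ (l : List Nat) (s : Int), l.foldl (fun p i => p * f i) s = s * (l.map f).prod := by
  intro l
  induction l with
  | nil => intro s; simp
  | cons c t ih => intro s; simp [List.foldl_cons, ih, mul_assoc]

lemma range_split {n : Nat} (h : 3 ≤ n) :
    List.range n = List.range' 0 (n / 2 + 1) ++
      (List.range' (n / 2 + 1) (n - 2 - n / 2) ++ [n - 1]) := by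
  rw [List.range_eq_range']
  have h2 : List.range' (n / 2 + 1) (n - 2 - n / 2) ++ [n - 1] =
      List.range' (n / 2 + 1) ((n - 2 - n / 2) + 1) := by
    have := @List.range'_append (n / 2 + 1) (n - 2 - n / 2) 1 1
    rw [List.range'_one] at this
    rw [← this]
    congr 2
    omega
  rw [h2]
  calc List.range' 0 n = List.range' 0 ((n / 2 + 1) + ((n - 2 - n / 2) + 1)) := by congr 1; omega
    _ = List.range' 0 (n / 2 + 1) ++ List.range' (n / 2 + 1) ((n - 2 - n / 2) + 1) := by
        rw [← List.range'_append]; norm_num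

lemma B_eq (a : List (List Int)) :
    prod_perimeter_area2_alt a = prod_perimeter_area2 a := by
  by_cases h3 : a.length < 3
  · -- no region-2 cells at all: A's found stays false, B returns 0 directly
    rw [A_eq]
    have hany : (List.range a.length).any (pvB a.length) = false := by
      rw [List.any_eq_false]
      intro i hi
      rw [List.mem_range] at hi
      simp [pvB, cells_low (show 2 * i ≤ a.length by omega)]
    rw [hany]
    unfold prod_perimeter_area2_alt
    simp [h3]
  · have h3 : 3 ≤ a.length := by omega
    set n := a.length with hn
    rw [A_eq]
    have hany : (List.range n).any (pvB n) = true := by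
      rw [List.any_eq_true]
      refine ⟨n - 1, by rw [List.mem_range]; omega, ?_⟩
      rw [pvB, cells_bot (by omega)]
      simp [List.range'_eq_nil_iff]
      omega
    rw [hany, if_pos rfl]
    unfold prod_perimeter_area2_alt
    rw [← hn, if_neg (by omega)]
    -- bottom-row fold
    have hbot : ∀ p : Int,
        (List.range' 1 (n - 2)).foldl (fun (p : Int) j => p * (a.getD (n - 1) []).getD j 0) p
          = p * pvQ a (n - 1) := by
      intro p
      rw [show (fun (p : Int) j => p * (a.getD (n - 1) []).getD j 0)
            = (fun (p : Int) j => p * pvV a (n - 1) j) from rfl, foldl_mul]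
      simp only [pvQ, ← hn, cells_bot (show 2 < n by omega)]
    -- middle fold
    have hmid : (List.range' (n / 2 + 1) (n - 2 - n / 2)).foldl (fun (p : Int) i =>
        if n - i = i - 1 then p * (a.getD i []).getD (i - 1) 0
        else p * ((a.getD i []).getD (n - i) 0 * (a.getD i []).getD (i - 1) 0)) 1
          = ((List.range' (n / 2 + 1) (n - 2 - n / 2)).map (pvQ a)).prod := by
      rw [PySem.List.foldl_congr_mem _ _ (fun (p : Int) i => p * pvQ a i) 1 ?_, foldl_mul, one_mul]
      intro p i hi
      rw [List.mem_range'_1] at hi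
      have h1 : n < 2 * i := by omega
      have h2 : i < n - 1 := by omega
      simp only [pvQ, ← hn, cells_mid h1 h2]
      split_ifs with hc <;> simp [pvV]
    rw [hbot, hmid]
    -- assemble A's product over the row split
    rw [range_split h3, List.map_append, List.prod_append, List.map_append, List.prod_append]
    have hlow : ((List.range' 0 (n / 2 + 1)).map (pvQ a)).prod = 1 := by
      apply List.prod_eq_one
      intro x hx
      rw [List.mem_map] at hx
      obtain ⟨i, hi, rfl⟩ := hx
      rw [List.mem_range'_1] at hi
      simp only [pvQ, ← hn, cells_low (show 2 * i ≤ n by omega)]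
      simp
    rw [hlow, one_mul]
    simp [mul_comm]

-- ===== VERDICT (by name: the statement is the Claim_ definition above) =====
theorem prod_perimeter_area2_spec : Claim_equal_prod_perimeter_area2 := by
  intro a _ _
  unfold Spec_prod_perimeter_area2
  exact (B_eq a).symm
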